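-- pv_equiv track=rewrite | github.com/fortyfive-labs/dreamlake | src/dreamlake/episode.py | _merge_by_timestamp
-- ===== SOURCE A (Python) =====
-- from typing import Optional, Dict, Any, List, Callable
--
-- def _merge_by_timestamp(data_points: List[Dict[str, Any]]) -> List[Dict[str, Any]]:
--     """
--     Merge data points with same _ts value.
--
--     Args:
--         data_points: List of data points (each with _ts field)
--
--     Returns:
--         List of merged data points, sorted by _ts
--     """
--     merged = {}
--     for point in data_points:
--         ts = point['_ts']
--         if ts in merged:
--             # Merge fields (later fields override earlier ones)
--             merged[ts].update(point)
--         else: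
--             merged[ts] = point.copy()
--
--     # Sort by timestamp
--     return [merged[ts] for ts in sorted(merged.keys())]
-- ===== SOURCE B (Python) =====
-- def _merge_by_timestamp(data_points):
--     """Merge data points with same _ts value, sorted by _ts.
--
--     Sort-then-scan: stable-sort by _ts, then merge each run of equal
--     timestamps in one linear pass (no hash table of groups).
--     """
--     pts = sorted(data_points, key=lambda p: p['_ts'])
--     result = []
--     i = 0
--     n = len(pts)
--     while i < n:
--         ts = pts[i]['_ts']
--         acc = pts[i].copy()
--         i += 1
--         while i < n and pts[i]['_ts'] == ts:
--             acc.update(pts[i])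
--             i += 1
--         result.append(acc)
--     return result
-- ===== Notes on version B (the rewrite author's own statement) =====
-- stated objective: alternative
-- what changed: A groups points in a dict keyed by _ts and then sorts the keys; B stable-sorts the points by _ts once and merges each run of equal timestamps in a single linear scan, with no grouping dict.
import Mathlib
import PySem

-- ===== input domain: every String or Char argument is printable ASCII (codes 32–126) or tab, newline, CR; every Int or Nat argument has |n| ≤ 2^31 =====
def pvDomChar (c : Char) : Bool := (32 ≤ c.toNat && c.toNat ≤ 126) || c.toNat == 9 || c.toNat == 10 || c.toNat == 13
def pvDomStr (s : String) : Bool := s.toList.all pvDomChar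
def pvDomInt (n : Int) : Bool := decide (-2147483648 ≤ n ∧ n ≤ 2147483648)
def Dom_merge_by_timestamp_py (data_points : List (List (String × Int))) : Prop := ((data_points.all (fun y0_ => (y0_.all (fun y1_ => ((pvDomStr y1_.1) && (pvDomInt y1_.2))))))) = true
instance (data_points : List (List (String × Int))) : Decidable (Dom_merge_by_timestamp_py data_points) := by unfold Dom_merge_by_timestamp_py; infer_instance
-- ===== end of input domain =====

-- B replaces A's dict-of-groups-then-sort-keys strategy with a stable sort by _ts followed by
-- one linear merging scan over the runs of equal timestamps (objective: alternative).

-- ===== PORT A =====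
-- point['_ts'] : lookup in the point seen as a dict; total getD form, guarded by Pre_ ("_ts" present)
def pvTs (p : List (String × Int)) : Int := (PySem.Dict.ofList p).getD "_ts" 0

def merge_by_timestamp_py (data_points : List (List (String × Int))) : List (List (String × Int)) :=
  -- merged = {}; for point in data_points: …
  let merged : PySem.Dict Int (PySem.Dict String Int) :=
    data_points.foldl (fun merged point =>
      let ts := pvTs point
      if merged.contains ts then
        -- merged[ts].update(point)
        merged.insert ts ((merged.getD ts PySem.Dict.empty).update point)
      else
        -- merged[ts] = point.copy()
        merged.insert ts (PySem.Dict.ofList point)) PySem.Dict.empty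
  -- return [merged[ts] for ts in sorted(merged.keys())]
  (PySem.List.sorted merged.keys (fun t => t) false).map
    (fun ts => (merged.getD ts PySem.Dict.empty).items)

-- ===== PORT B =====
-- the outer while-loop of Source B: each step merges one run of equal timestamps
def pvMergeRuns : List (List (String × Int)) → List (List (String × Int))
  | [] => []
  | p :: rest =>
    let ts := pvTs p
    let run := rest.takeWhile (fun q => pvTs q == ts)
    let rest' := rest.dropWhile (fun q => pvTs q == ts)
    (run.foldl (fun acc q => acc.update q) (PySem.Dict.ofList p)).items :: pvMergeRuns rest'
termination_by l => l.length
decreasing_by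
  simpa using Nat.lt_succ_of_le (List.length_dropWhile_le _ _)

def merge_by_timestamp_py_alt (data_points : List (List (String × Int))) : List (List (String × Int)) :=
  pvMergeRuns (PySem.List.sorted data_points pvTs false)

-- ===== PRECONDITION & SPEC =====
-- Pre_: every point has a '_ts' field; on a point without one the Python raises KeyError.
def Pre_merge_by_timestamp_py (data_points : List (List (String × Int))) : Prop :=
  ∀ p ∈ data_points, "_ts" ∈ p.map Prod.fst
instance (data_points : List (List (String × Int))) : Decidable (Pre_merge_by_timestamp_py data_points) := by unfold Pre_merge_by_timestamp_py; infer_instance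

def pvWitness_merge_by_timestamp_py : (List (List (String × Int))) :=
  [[("_ts", 2), ("a", 1)], [("_ts", 1)], [("_ts", 2), ("b", 3)]]

def Spec_merge_by_timestamp_py (data_points : List (List (String × Int))) (out : List (List (String × Int))) : Prop := out = merge_by_timestamp_py_alt data_points
instance (data_points : List (List (String × Int))) (out : List (List (String × Int))) : Decidable (Spec_merge_by_timestamp_py data_points out) := by unfold Spec_merge_by_timestamp_py; infer_instance

-- ===== CLAIM (what is proved, stated in full; the proofs are below) =====
def Claim_equal_merge_by_timestamp_py : Prop := ∀ (data_points : List (List (String × Int))), Dom_merge_by_timestamp_py data_points → Pre_merge_by_timestamp_py data_points → Spec_merge_by_timestamp_py data_points (merge_by_timestamp_py data_points)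

-- ===== LEMMAS AND PROOFS =====

-- A's loop body, as a named function (definitionally equal to the lambda in the port)
def pvStep (d : PySem.Dict Int (PySem.Dict String Int)) (p : List (String × Int)) :
    PySem.Dict Int (PySem.Dict String Int) :=
  if d.contains (pvTs p) then
    d.insert (pvTs p) ((d.getD (pvTs p) PySem.Dict.empty).update p)
  else
    d.insert (pvTs p) (PySem.Dict.ofList p)

-- A's loop body is uniformly "insert ts (old-group.update point)"
lemma pvStep_eq (d : PySem.Dict Int (PySem.Dict String Int)) (p : List (String × Int)) :
    pvStep d p = d.insert (pvTs p) ((d.getD (pvTs p) PySem.Dict.empty).update p) := by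
  unfold pvStep
  split_ifs with h
  · rfl
  · rw [PySem.Dict.getD_of_not_contains _ _ (by simpa using h)]
    rfl

-- lookup of one group after A's whole loop = fold of dict-update over the filter
lemma pvMerged_getD (xs : List (List (String × Int))) (d : PySem.Dict Int (PySem.Dict String Int)) (t : Int) :
    (xs.foldl pvStep d).getD t PySem.Dict.empty
      = (xs.filter (fun p => pvTs p == t)).foldl (fun acc q => acc.update q)
          (d.getD t PySem.Dict.empty) := by
  induction xs generalizing d with
  | nil => rfl
  | cons p rest ih =>
    simp only [List.foldl_cons, List.filter_cons]
    rw [ih, pvStep_eq]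
    by_cases ht : pvTs p = t
    · subst ht
      simp [PySem.Dict.getD_insert_self]
    · rw [PySem.Dict.getD_insert_of_ne _ _ _ (Ne.symm ht)]
      simp [ht]

-- inserting x into a key-ordered list keeps it key-ordered
lemma pvPairwise_insertBy (x : List (String × Int)) (ys : List (List (String × Int)))
    (h : ys.Pairwise (fun a b => pvTs a ≤ pvTs b)) :
    (PySem.List.insertBy (fun a b => decide (pvTs a < pvTs b)) x ys).Pairwise
      (fun a b => pvTs a ≤ pvTs b) := by
  induction ys with
  | nil => simp [PySem.List.insertBy]
  | cons y ys ih =>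
    rw [List.pairwise_cons] at h
    obtain ⟨hy, hys⟩ := h
    simp only [PySem.List.insertBy]
    split_ifs with hb
    · simp only [decide_eq_true_eq] at hb
      refine List.Pairwise.cons ?_ (List.Pairwise.cons hy hys)
      intro z hz
      rcases List.mem_cons.mp hz with rfl | hz
      · exact le_of_lt hb
      · exact le_of_lt (lt_of_lt_of_le hb (hy z hz))
    · simp only [decide_eq_true_eq, not_lt] at hb
      refine List.Pairwise.cons ?_ (ih hys)
      intro z hz
      rcases (PySem.List.mem_insertBy _ _ _ _).mp hz with rfl | hz
      · exact hb
      · exact hy z hz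

-- stability, one step: x lands after every element with its own key
lemma pvFilter_insertBy_self (x : List (String × Int)) (ys : List (List (String × Int)))
    (h : ys.Pairwise (fun a b => pvTs a ≤ pvTs b)) :
    (PySem.List.insertBy (fun a b => decide (pvTs a < pvTs b)) x ys).filter
        (fun q => pvTs q == pvTs x)
      = ys.filter (fun q => pvTs q == pvTs x) ++ [x] := by
  induction ys with
  | nil => simp [PySem.List.insertBy]
  | cons y ys ih =>
    rw [List.pairwise_cons] at h
    obtain ⟨hy, hys⟩ := h
    simp only [PySem.List.insertBy]
    split_ifs with hb
    · simp only [decide_eq_true_eq] at hb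
      have hnil : ∀ z ∈ y :: ys, ¬ (pvTs z == pvTs x) = true := by
        intro z hz
        rcases List.mem_cons.mp hz with rfl | hz
        · simp; omega
        · have := hy z hz; simp; omega
      rw [List.filter_cons_of_pos (by simp), List.filter_eq_nil_iff.mpr hnil]
      simp
    · by_cases hyt : (pvTs y == pvTs x) = true
      all_goals simp [hyt, ih hys]

-- inserting x does not disturb the elements of any other key
lemma pvFilter_insertBy_ne (x : List (String × Int)) (ys : List (List (String × Int)))
    (t : Int) (ht : t ≠ pvTs x) :
    (PySem.List.insertBy (fun a b => decide (pvTs a < pvTs b)) x ys).filter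
        (fun q => pvTs q == t)
      = ys.filter (fun q => pvTs q == t) := by
  induction ys with
  | nil => simp [PySem.List.insertBy]; omega
  | cons y ys ih =>
    simp only [PySem.List.insertBy]
    split_ifs with hb
    · rw [List.filter_cons_of_neg (by simp; omega)]
    · by_cases hyt : (pvTs y == t) = true
      all_goals simp [hyt, ih]

lemma pvFilter_foldl (xs acc : List (List (String × Int))) (t : Int)
    (hacc : acc.Pairwise (fun a b => pvTs a ≤ pvTs b)) :
    (xs.foldl (fun a x => PySem.List.insertBy (fun a b => decide (pvTs a < pvTs b)) x a) acc).filter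
        (fun q => pvTs q == t)
      = acc.filter (fun q => pvTs q == t) ++ xs.filter (fun q => pvTs q == t) := by
  induction xs generalizing acc with
  | nil => simp
  | cons p xs ih =>
    simp only [List.foldl_cons]
    rw [ih _ (pvPairwise_insertBy p acc hacc)]
    by_cases hpt : pvTs p = t
    · subst hpt
      rw [pvFilter_insertBy_self p acc hacc, List.filter_cons_of_pos (by simp)]
      simp
    · rw [pvFilter_insertBy_ne p acc t (Ne.symm hpt), List.filter_cons_of_neg (by simpa using hpt)]

-- STABILITY of the sort: filtering one timestamp out of the sorted list gives the original order
lemma pvFilter_sorted (xs : List (List (String × Int))) (t : Int) :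
    (PySem.List.sorted xs pvTs false).filter (fun p => pvTs p == t)
      = xs.filter (fun p => pvTs p == t) := by
  rw [PySem.List.sorted_eq_foldl_insertBy]
  simpa using pvFilter_foldl xs [] t (by simp)

-- the first element left by dropWhile fails the predicate
lemma pvDropWhile_head_false {α : Type} (p : α → Bool) (l : List α) (x : α) (xs : List α)
    (h : l.dropWhile p = x :: xs) : p x = false := by
  induction l with
  | nil => simp at h
  | cons a t ih =>
    rw [List.dropWhile_cons] at h
    split_ifs at h with ha
    · exact ih h
    · cases h; simpa using ha

-- B's scan over a key-sorted list = "sorted distinct keys, map group-merge" canonical form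
lemma pvMergeRuns_eq (ys : List (List (String × Int)))
    (h : ys.Pairwise (fun a b => pvTs a ≤ pvTs b)) :
    pvMergeRuns ys
      = (PySem.List.sorted (PySem.List.dedup (ys.map pvTs)) (fun t => t) false).map
          (fun t => ((ys.filter (fun p => pvTs p == t)).foldl (fun acc q => acc.update q)
              PySem.Dict.empty).items) := by
  induction ys using pvMergeRuns.induct with
  | case1 => rw [pvMergeRuns]; rfl
  | case2 p rest ts rest' ih =>
    set run : List (List (String × Int)) := rest.takeWhile (fun q => pvTs q == ts) with hrundef
    rw [List.pairwise_cons] at h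
    obtain ⟨hple, hpw⟩ := h
    have hrr : run ++ rest' = rest := List.takeWhile_append_dropWhile
    have hrun : ∀ q ∈ run, pvTs q = ts := by
      intro q hq
      have := List.mem_takeWhile_imp hq
      simpa using this
    have hsub : rest'.Sublist rest := List.dropWhile_sublist _
    have hpw' : rest'.Pairwise (fun a b => pvTs a ≤ pvTs b) := hpw.sublist hsub
    have hrest' : ∀ q ∈ rest', ts < pvTs q := by
      cases hr : rest' with
      | nil => simp
      | cons h' t' =>
        have hh' : pvTs h' ≠ ts := by
          have := pvDropWhile_head_false (fun q => pvTs q == ts) rest h' t' hr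
          simpa using this
        have hrw : rest'.Pairwise (fun a b => pvTs a ≤ pvTs b) := hpw'
        rw [hr, List.pairwise_cons] at hrw
        intro q hq
        have hlt : ts < pvTs h' :=
          lt_of_le_of_ne (hple h' (hsub.mem (hr ▸ List.mem_cons_self))) (Ne.symm hh')
        rcases List.mem_cons.mp hq with rfl | hq'
        · exact hlt
        · exact lt_of_lt_of_le hlt (hrw.1 q hq')
    have hfilter : (p :: rest).filter (fun q => pvTs q == ts) = p :: run := by
      rw [List.filter_cons_of_pos (by simp; rfl)]
      congr 1
      rw [← hrr, List.filter_append]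
      rw [List.filter_eq_self.mpr (fun q hq => by simp [hrun q hq]),
          List.filter_eq_nil_iff.mpr (fun q hq => by
            simpa using (ne_of_gt (hrest' q hq)))]
      simp
    have hmemS : ∀ x, x ∈ PySem.List.sorted (PySem.List.dedup (rest'.map pvTs)) (fun t => t) false
        ↔ ∃ q ∈ rest', pvTs q = x := by
      intro x
      simp [PySem.List.mem_sorted]
    have hnodupS : (ts :: PySem.List.sorted (PySem.List.dedup (rest'.map pvTs)) (fun t => t) false).Nodup := by
      refine List.Nodup.cons ?_ ((PySem.List.sorted_perm _ _ _).nodup_iff.mpr (PySem.List.nodup_dedup _))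
      intro hmem
      obtain ⟨q, hq, hqx⟩ := (hmemS ts).mp hmem
      exact absurd hqx (ne_of_gt (hrest' q hq))
    have hkeys : PySem.List.sorted (PySem.List.dedup ((p :: rest).map pvTs)) (fun t => t) false
        = ts :: PySem.List.sorted (PySem.List.dedup (rest'.map pvTs)) (fun t => t) false := by
      apply PySem.List.sorted_eq_of_perm_of_pairwise_lt
      · rw [List.perm_ext_iff_of_nodup hnodupS (PySem.List.nodup_dedup _)]
        intro x
        rw [List.mem_cons, hmemS, PySem.List.mem_dedup]
        simp only [List.map_cons, List.mem_cons, List.mem_map]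
        constructor
        · rintro (rfl | ⟨q, hq, rfl⟩)
          · exact Or.inl rfl
          · exact Or.inr ⟨q, hsub.mem hq, rfl⟩
        · rintro (rfl | ⟨q, hq, rfl⟩)
          · exact Or.inl rfl
          · rw [← hrr] at hq
            rcases List.mem_append.mp hq with hq | hq
            · exact Or.inl (hrun q hq)
            · exact Or.inr ⟨q, hq, rfl⟩
      · refine List.Pairwise.cons ?_ ?_
        · intro x hx
          obtain ⟨q, hq, rfl⟩ := (hmemS x).mp hx
          exact hrest' q hq
        · exact PySem.List.sorted_ofList_pairwise_lt _
    rw [pvMergeRuns]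
    rw [hkeys, List.map_cons, hfilter]
    congr 1
    rw [ih hpw']
    apply List.map_congr_left
    intro t' ht'
    obtain ⟨q0, hq0, rfl⟩ := (hmemS t').mp ht'
    have hne : pvTs q0 ≠ ts := ne_of_gt (hrest' q0 hq0)
    have h0 : run.filter (fun q => pvTs q == pvTs q0) = [] :=
      List.filter_eq_nil_iff.mpr (fun q hq => by
        have := hrun q hq
        simpa [this] using fun hc => hne hc.symm)
    have hflt : (p :: rest).filter (fun q => pvTs q == pvTs q0)
        = rest'.filter (fun q => pvTs q == pvTs q0) := by
      rw [List.filter_cons_of_neg (by simpa using fun hc => hne hc.symm), ← hrr,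
          List.filter_append, h0, List.nil_append]
    rw [hflt]

-- ===== VERDICT (by name: the statement is the Claim_ definition above) =====
theorem merge_by_timestamp_py_spec : Claim_equal_merge_by_timestamp_py := by
  intro xs _hdom _hpre
  unfold Spec_merge_by_timestamp_py
  have hstep : (fun (merged : PySem.Dict Int (PySem.Dict String Int)) point =>
      let ts := pvTs point
      if merged.contains ts then
        merged.insert ts ((merged.getD ts PySem.Dict.empty).update point)
      else
        merged.insert ts (PySem.Dict.ofList point)) = pvStep := rfl
  have hA : merge_by_timestamp_py xs
      = (PySem.List.sorted (xs.foldl pvStep PySem.Dict.empty).keys (fun t => t) false).map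
          (fun ts => ((xs.foldl pvStep PySem.Dict.empty).getD ts PySem.Dict.empty).items) := by
    rw [merge_by_timestamp_py, hstep]
  have huni : xs.foldl pvStep PySem.Dict.empty
      = xs.foldl (fun d p => d.insert (pvTs p) ((d.getD (pvTs p) PySem.Dict.empty).update p))
          PySem.Dict.empty := by
    rw [funext (fun d => funext (fun p => pvStep_eq d p))]
  have hkeysA : (xs.foldl pvStep PySem.Dict.empty).keys = PySem.List.dedup (xs.map pvTs) := by
    rw [huni, PySem.Dict.keys_foldl_insert_key]
    simp [PySem.Dict.keys_empty, PySem.List.dedup, PySem.Set.update_nil_left]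
  have hGet : (fun ts => ((xs.foldl pvStep PySem.Dict.empty).getD ts PySem.Dict.empty).items)
      = fun t => ((xs.filter (fun p => pvTs p == t)).foldl (fun acc q => acc.update q)
          PySem.Dict.empty).items := by
    funext t
    rw [pvMerged_getD, PySem.Dict.getD_empty]
  have hB : merge_by_timestamp_py_alt xs = pvMergeRuns (PySem.List.sorted xs pvTs false) := rfl
  have hpermKeys : (PySem.List.dedup ((PySem.List.sorted xs pvTs false).map pvTs)).Perm
      (PySem.List.dedup (xs.map pvTs)) := by
    rw [List.perm_ext_iff_of_nodup (PySem.List.nodup_dedup _) (PySem.List.nodup_dedup _)]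
    intro x
    simp [PySem.List.mem_sorted]
  have hsortKeys : PySem.List.sorted (PySem.List.dedup ((PySem.List.sorted xs pvTs false).map pvTs)) (fun t => t) false
      = PySem.List.sorted (PySem.List.dedup (xs.map pvTs)) (fun t => t) false :=
    PySem.List.sorted_eq_sorted_of_perm _ _ _ (fun a b h => h) hpermKeys
  have hfilters : (fun t => (((PySem.List.sorted xs pvTs false).filter (fun p => pvTs p == t)).foldl
        (fun acc q => acc.update q) PySem.Dict.empty).items)
      = fun t => ((xs.filter (fun p => pvTs p == t)).foldl (fun acc q => acc.update q)
          PySem.Dict.empty).items := by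
    funext t
    rw [pvFilter_sorted]
  rw [hA, hkeysA, hGet, hB, pvMergeRuns_eq _ (PySem.List.sorted_pairwise xs pvTs),
      hsortKeys, hfilters]
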